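-- pv_equiv track=rewrite | github.com/jahirulislammolla/CodeFights | Challenges/iterMask.py | iterMask
-- ===== SOURCE A (Python) =====
-- from itertools import combinations
--
-- def iterMask(t):
--     n=list("{:0b}".format(t))
--     x=[]
--     for i,j in enumerate(n):
--         if j=="1":
--             x+=[i]
--     m=[t,0]
--     for i in range(1,len(x)):
--         for j in combinations(x,i):
--             y=[]
--             y+=n
--             for k in j:
--                 y[k]="0"
--             m+=[int("".join(y),2)]
--     return sorted(m,reverse=True)
-- ===== SOURCE B (Python) =====
-- def iterMask(t):
--     # Enumerate the submasks of t directly: from t, the next smaller submask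
--     # is (sub - 1) & t, and the walk visits them in strictly decreasing order,
--     # so no sort is needed.
--     subs = []
--     sub = t
--     while sub:
--         subs.append(sub)
--         sub = (sub - 1) & t
--     subs.append(0)
--     return subs
-- ===== Notes on version B (the rewrite author's own statement) =====
-- stated objective: faster
-- what changed: B replaces A's enumeration of all combinations of bit positions with per-subset binary-string surgery plus a final sort by the standard submask walk sub = (sub-1) & t, which emits the submasks already in descending order; Pre_ excludes negative t, where B's walk does not terminate (A's sign-flipped output there is an artefact of formatting t with a leading '-').
-- intended difference: For t = 0 A returns [0, 0] (the single submask 0 listed twice, an accident of seeding m with both t and 0); B returns [0], each submask exactly once, which is the intended enumeration. — e.g. on iterMask(0): A returns [0, 0], B returns [0]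
-- outside the precondition, e.g. on iterMask(-5): A returns [0, -1, -4, -5], B does not finish within the time limit
import Mathlib
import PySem

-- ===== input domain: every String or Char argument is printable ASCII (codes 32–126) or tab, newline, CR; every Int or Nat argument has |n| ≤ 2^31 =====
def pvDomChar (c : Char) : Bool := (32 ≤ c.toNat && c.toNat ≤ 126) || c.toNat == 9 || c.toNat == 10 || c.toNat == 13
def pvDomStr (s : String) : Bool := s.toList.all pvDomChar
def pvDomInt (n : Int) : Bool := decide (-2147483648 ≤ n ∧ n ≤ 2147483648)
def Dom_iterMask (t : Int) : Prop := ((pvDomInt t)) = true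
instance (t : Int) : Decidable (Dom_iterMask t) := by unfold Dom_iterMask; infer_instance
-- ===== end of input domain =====

-- B enumerates the submasks of t directly with the walk sub = (sub - 1) & t, which
-- produces them already in descending order, instead of A's per-combination
-- binary-string surgery followed by a sort.

-- ===== PORT A =====

-- "{:0b}".format(t), hand-ported (exact: binary digits msb-first, "0" for 0, '-' prefix for negatives)
def binDigits (n : Nat) : List Char :=
  if _h : n < 2 then [if n = 1 then '1' else '0']
  else binDigits (n / 2) ++ [if n % 2 = 1 then '1' else '0']
decreasing_by exact Nat.div_lt_self (by omega) (by omega)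

def toBin (t : Int) : List Char :=
  if t < 0 then '-' :: binDigits (-t).toNat else binDigits t.toNat

-- int("".join(y), 2), hand-ported (exact on the strings A builds here:
-- an optional leading '-' followed by '0'/'1' digits)
def parseBinNat (l : List Char) : Nat :=
  l.foldl (fun acc c => 2 * acc + (if c = '1' then 1 else 0)) 0

def intOfBin (l : List Char) : Int :=
  if l.head? = some '-' then -((parseBinNat l.tail : Nat) : Int)
  else ((parseBinNat l : Nat) : Int)

def iterMask (t : Int) : List Int :=
  let n := toBin t
  let x := (PySem.List.enumerate n).foldl
    (fun x ij => if ij.2 = '1' then x ++ [ij.1] else x) []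
  let m : List Int := [t, 0]
  let m := (PySem.List.pyRange 1 (PySem.List.len x) 1).foldl (fun m i =>
    (PySem.List.combinations x i.toNat).foldl (fun m j =>
      let y := j.foldl (fun y k => PySem.List.pySetD y k '0') n
      m ++ [intOfBin y]) m) m
  PySem.List.sorted m (fun v => v) true

-- ===== PORT B =====

-- the while loop of Source B, on Nat (exact for t ≥ 0, i.e. on Pre_;
-- on t < 0 the Python loop does not terminate, and Pre_ excludes those inputs)
def subWalk (t sub : Nat) : List Nat :=
  if sub = 0 then [] else sub :: subWalk t ((sub - 1) &&& t)
decreasing_by have := Nat.and_le_left (n := sub - 1) (m := t); omega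

def iterMask_alt (t : Int) : List Int :=
  (subWalk t.toNat t.toNat).map (fun s : Nat => (s : Int)) ++ [0]

-- ===== PRECONDITION & SPEC =====

-- Pre_ excludes negative t, on which B's submask walk does not terminate
-- (the Python loop of Source B diverges there); A's value there — sign-flipped
-- submask values — is an artefact of formatting t with a leading '-'.
def Pre_iterMask (t : Int) : Prop := 0 ≤ t
instance (t : Int) : Decidable (Pre_iterMask t) := by unfold Pre_iterMask; infer_instance
def pvWitness_iterMask : Int := 6

-- For t = 0, A returns [0, 0] — the single submask 0 listed twice, an accident of
-- seeding m with both t and 0 — while B returns [0], each submask exactly once,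
-- which is the intended enumeration.
def D_iterMask (t : Int) : Prop := t = 0
instance (t : Int) : Decidable (D_iterMask t) := by unfold D_iterMask; infer_instance

def Spec_iterMask (t : Int) (out : List Int) : Prop := ¬ D_iterMask t → out = iterMask_alt t
instance (t : Int) (out : List Int) : Decidable (Spec_iterMask t out) := by unfold Spec_iterMask; infer_instance

def pvDiffWitness_iterMask : Int := 0
def pvDiffWitnessOut_iterMask : (List Int) × (List Int) := ([0, 0], [0])

-- ===== CLAIM (what is proved, stated in full; the proofs are below) =====
def Claim_unchanged_iterMask : Prop := ∀ (t : Int), Dom_iterMask t → Pre_iterMask t → Spec_iterMask t (iterMask t)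
def Claim_changed_iterMask : Prop := Dom_iterMask (pvDiffWitness_iterMask) ∧ Pre_iterMask (pvDiffWitness_iterMask) ∧ D_iterMask (pvDiffWitness_iterMask) ∧ iterMask (pvDiffWitness_iterMask) = pvDiffWitnessOut_iterMask.1 ∧ iterMask_alt (pvDiffWitness_iterMask) = pvDiffWitnessOut_iterMask.2 ∧ pvDiffWitnessOut_iterMask.1 ≠ pvDiffWitnessOut_iterMask.2
def Claim_exact_iterMask : Prop := ∀ (t : Int), Dom_iterMask t → Pre_iterMask t → D_iterMask t → iterMask t ≠ iterMask_alt t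

-- ===== LEMMAS AND PROOFS =====

-- --- proof-side vocabulary ---

-- sum of powers of two over a list of exponents
def sumE (E : List Nat) : Nat := (E.map (2 ^ ·)).sum

-- all subset sums of {2^e : e ∈ E}, in descending order when E is strictly descending
def subsDesc : List Nat → List Nat
  | [] => [0]
  | e :: E => (subsDesc E).map (2 ^ e + ·) ++ subsDesc E

-- positions of the '1' characters (A's list x)
def posOnes : List Char → List Nat
  | [] => []
  | c :: r => if c = '1' then 0 :: (posOnes r).map (· + 1) else (posOnes r).map (· + 1)

-- exponents of the '1' characters, msb-first (strictly descending)
def exps : List Char → List Nat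
  | [] => []
  | c :: r => if c = '1' then r.length :: exps r else exps r

-- A's per-combination value, in Nat
def valN (n : List Char) (j : List Nat) : Nat :=
  parseBinNat (j.foldl (fun y k => y.set k '0') n)

-- --- parsing / binDigits facts ---

lemma parse_foldl (l : List Char) (acc : Nat) :
    l.foldl (fun a c => 2 * a + (if c = '1' then 1 else 0)) acc
      = acc * 2 ^ l.length + parseBinNat l := by
  induction l generalizing acc with
  | nil => simp [parseBinNat]
  | cons c r ih =>
    simp only [List.foldl_cons, List.length_cons, parseBinNat] at *
    rw [ih (2 * acc + (if c = '1' then 1 else 0)), ih (2 * 0 + (if c = '1' then 1 else 0))]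
    generalize List.foldl _ 0 r = q
    ring

lemma parse_append_one (l : List Char) (c : Char) :
    parseBinNat (l ++ [c]) = 2 * parseBinNat l + (if c = '1' then 1 else 0) := by
  simp [parseBinNat, List.foldl_append]

lemma sumE_cons (e : Nat) (E : List Nat) : sumE (e :: E) = 2 ^ e + sumE E := by
  simp [sumE]

lemma parse_cons (c : Char) (r : List Char) :
    parseBinNat (c :: r) = (if c = '1' then 1 else 0) * 2 ^ r.length + parseBinNat r := by
  show List.foldl _ _ _ = _
  rw [List.foldl_cons, parse_foldl]
  ring_nf

lemma parse_eq_sumE (n : List Char) : parseBinNat n = sumE (exps n) := by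
  induction n with
  | nil => simp [parseBinNat, sumE, exps]
  | cons c r ih =>
    rw [parse_cons, ih, exps]
    split_ifs with h <;> simp [sumE_cons]

lemma parse_binDigits (a : Nat) : parseBinNat (binDigits a) = a := by
  induction a using binDigits.induct with
  | case1 n h =>
    rw [binDigits, dif_pos h]
    interval_cases n <;> simp [parseBinNat]
  | case2 n h ih =>
    rw [binDigits, dif_neg h, parse_append_one, ih]
    rcases Nat.mod_two_eq_zero_or_one n with h2 | h2 <;> simp [h2] <;> omega

lemma binDigits_chars (a : Nat) : ∀ c ∈ binDigits a, c = '0' ∨ c = '1' := by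
  induction a using binDigits.induct with
  | case1 n h =>
    rw [binDigits, dif_pos h]
    split_ifs <;> simp
  | case2 n h ih =>
    rw [binDigits, dif_neg h]
    intro c hc
    rcases List.mem_append.1 hc with hc | hc
    · exact ih c hc
    · simp only [List.mem_singleton] at hc
      subst hc
      split_ifs <;> simp

lemma exps_eq_map (n : List Char) :
    exps n = (posOnes n).map (fun k => n.length - 1 - k) := by
  induction n with
  | nil => simp [exps, posOnes]
  | cons c r ih =>
    simp only [exps, posOnes, List.length_cons]
    split_ifs with h
    · simp only [List.map_cons, List.map_map, ih, Nat.add_sub_cancel, Nat.sub_zero]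
      congr 1
      apply List.map_congr_left
      intro k _
      simp only [Function.comp_apply]
      omega
    · rw [ih, List.map_map]
      apply List.map_congr_left
      intro k _
      simp [Function.comp]
      omega

lemma posOnes_pairwise (n : List Char) : (posOnes n).Pairwise (· < ·) := by
  induction n with
  | nil => simp [posOnes]
  | cons c r ih =>
    have hmap : ((posOnes r).map (· + 1)).Pairwise (· < ·) :=
      List.Pairwise.map _ (fun a b h => by omega) ih
    simp only [posOnes]
    split_ifs with h
    · refine List.Pairwise.cons ?_ hmap
      intro k hk
      obtain ⟨k', _, rfl⟩ := List.mem_map.1 hk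
      omega
    · exact hmap

lemma exps_lt (n : List Char) : ∀ e ∈ exps n, e < n.length := by
  induction n with
  | nil => simp [exps]
  | cons c r ih =>
    simp only [exps, List.length_cons]
    split_ifs with h <;> intro e he
    · rcases List.mem_cons.1 he with rfl | he
      · omega
      · have := ih e he; omega
    · have := ih e he; omega

lemma exps_pairwise (n : List Char) : (exps n).Pairwise (· > ·) := by
  induction n with
  | nil => simp [exps]
  | cons c r ih =>
    simp only [exps]
    split_ifs with h
    · exact List.Pairwise.cons (fun e he => exps_lt r e he) ih
    · exact ih

lemma posOnes_set (n : List Char) (k : Nat) :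
    posOnes (n.set k '0') = (posOnes n).filter (fun k' => k' ≠ k) := by
  induction n generalizing k with
  | nil => simp [posOnes]
  | cons c r ih =>
    cases k with
    | zero =>
      simp only [List.set_cons_zero, posOnes, if_neg (by decide : ¬ ('0' : Char) = '1')]
      split_ifs with h
      · rw [List.filter_cons]
        simp only [decide_eq_true_eq]
        rw [if_neg (by simp), List.filter_map]
        congr 1
        symm
        apply (List.filter_eq_self).2
        intro a _
        simp [Function.comp]
      · rw [List.filter_map]
        congr 1
        symm
        apply (List.filter_eq_self).2
        intro a _
        simp [Function.comp]
    | succ k' =>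
      simp only [List.set_cons_succ, posOnes]
      split_ifs with h
      · rw [List.filter_cons]
        simp only [decide_eq_true_eq]
        rw [if_pos (by simp), ih, List.filter_map]
        congr 2
        apply List.filter_congr
        intro a _
        simp only [Function.comp_apply, decide_eq_decide]
        omega
      · rw [ih, List.filter_map]
        congr 1
        apply List.filter_congr
        intro a _
        simp only [Function.comp_apply, decide_eq_decide]
        omega

lemma posOnes_setFold (j : List Nat) (n : List Char) :
    posOnes (j.foldl (fun y k => y.set k '0') n)
      = (posOnes n).filter (fun k' => decide (k' ∉ j)) := by
  induction j generalizing n with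
  | nil =>
    simp only [List.foldl_nil]
    symm
    apply (List.filter_eq_self).2
    intro a _
    simp
  | cons k j' ih =>
    rw [List.foldl_cons, ih, posOnes_set, List.filter_filter]
    apply List.filter_congr
    intro a _
    by_cases h1 : a = k <;> by_cases h2 : a ∈ j' <;> simp [h1, h2]

lemma length_setFold (j : List Nat) (n : List Char) :
    (j.foldl (fun y k => y.set k '0') n).length = n.length := by
  induction j generalizing n with
  | nil => rfl
  | cons k j' ih => rw [List.foldl_cons, ih, List.length_set]

lemma chars_setFold (n : List Char) (hn : ∀ c ∈ n, c = '0' ∨ c = '1') (j : List Nat) :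
    ∀ c ∈ j.foldl (fun y k => y.set k '0') n, c = '0' ∨ c = '1' := by
  induction j generalizing n with
  | nil => exact hn
  | cons k j' ih =>
    rw [List.foldl_cons]
    apply ih
    intro c hc
    rcases List.mem_or_eq_of_mem_set hc with hc | rfl
    · exact hn c hc
    · left; rfl

lemma valN_eq (n : List Char) (j : List Nat) :
    valN n j = sumE (((posOnes n).filter (fun k' => decide (k' ∉ j))).map
      (fun k => n.length - 1 - k)) := by
  rw [valN, parse_eq_sumE, exps_eq_map, posOnes_setFold, length_setFold]

-- --- sumE / subsDesc facts ---

lemma sumE_lt_pow (E : List Nat) (e : Nat) (hd : E.Pairwise (· > ·))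
    (hlt : ∀ f ∈ E, f < e) : sumE E < 2 ^ e := by
  induction E generalizing e with
  | nil => simp [sumE]
  | cons f R ih =>
    rw [sumE_cons]
    have h1 : sumE R < 2 ^ f :=
      ih f (List.pairwise_cons.1 hd).2 (fun g hg => (List.pairwise_cons.1 hd).1 g hg)
    have h2 : f < e := hlt f (by simp)
    have h3 : 2 ^ (f + 1) ≤ 2 ^ e := Nat.pow_le_pow_right (by omega) (by omega)
    have : 2 ^ f + 2 ^ f = 2 ^ (f + 1) := by ring
    omega

lemma subsDesc_le (E : List Nat) : ∀ s ∈ subsDesc E, s ≤ sumE E := by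
  induction E with
  | nil => simp [subsDesc, sumE]
  | cons e R ih =>
    intro s hs
    rw [subsDesc] at hs
    rw [sumE_cons]
    rcases List.mem_append.1 hs with hs | hs
    · obtain ⟨s', hs', rfl⟩ := List.mem_map.1 hs
      exact Nat.add_le_add_left (ih s' hs') _
    · exact le_trans (ih s hs) (Nat.le_add_left _ _)

lemma subsDesc_pairwise (E : List Nat) (hd : E.Pairwise (· > ·)) :
    (subsDesc E).Pairwise (· > ·) := by
  induction E with
  | nil => simp [subsDesc]
  | cons e R ih =>
    obtain ⟨h1, h2⟩ := List.pairwise_cons.1 hd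
    have hR := ih h2
    have hlt : sumE R < 2 ^ e := sumE_lt_pow R e h2 h1
    rw [subsDesc]
    apply (List.pairwise_append).2
    refine ⟨List.Pairwise.map _ (fun a b h => by omega) hR, hR, ?_⟩
    intro a ha b hb
    obtain ⟨a', _, rfl⟩ := List.mem_map.1 ha
    calc b ≤ sumE R := subsDesc_le R b hb
      _ < 2 ^ e := hlt
      _ ≤ 2 ^ e + a' := Nat.le_add_right _ _

lemma subsDesc_perm (E : List Nat) : (subsDesc E).Perm (E.sublists'.map sumE) := by
  induction E with
  | nil => simp [subsDesc, sumE]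
  | cons e R ih =>
    rw [subsDesc, List.sublists'_cons, List.map_append, List.map_map]
    refine List.Perm.trans (List.perm_append_comm) (List.Perm.append ih ?_)
    have h := List.Perm.map (fun s => 2 ^ e + s) ih
    rw [List.map_map] at h
    refine h.trans (List.Perm.of_eq ?_)
    apply List.map_congr_left
    intro s _
    simp [sumE_cons, Function.comp]

-- --- bit lemmas for the walk ---

lemma testBit_pow_add (e a i : Nat) (h : a < 2 ^ e) :
    (2 ^ e + a).testBit i = if i = e then true else a.testBit i := by
  rcases lt_trichotomy i e with hie | rfl | hie
  · rw [if_neg (by omega), Nat.testBit_eq_decide_div_mod_eq, Nat.testBit_eq_decide_div_mod_eq]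
    have h2 : 2 ^ e = 2 ^ (e - i) * 2 ^ i := by rw [← pow_add]; congr 1; omega
    rw [h2, Nat.add_comm, Nat.add_mul_div_right _ _ (Nat.two_pow_pos i)]
    have h3 : 2 ^ (e - i) = 2 * 2 ^ (e - i - 1) := by rw [← pow_succ']; congr 1; omega
    rw [h3, Nat.add_mul_mod_self_left]
  · rw [if_pos rfl, Nat.testBit_eq_decide_div_mod_eq]
    have h1 : (2 ^ i + a) / 2 ^ i = 1 := by
      rw [Nat.add_comm, Nat.add_div_right _ (Nat.two_pow_pos i), Nat.div_eq_of_lt h]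
    simp [h1]
  · rw [if_neg (by omega)]
    have h1 : 2 ^ e + a < 2 ^ i := by
      have : 2 ^ (e + 1) ≤ 2 ^ i := Nat.pow_le_pow_right (by omega) (by omega)
      have : 2 ^ (e + 1) = 2 ^ e + 2 ^ e := by ring
      omega
    rw [Nat.testBit_eq_false_of_lt h1,
      Nat.testBit_eq_false_of_lt (lt_trans h (by omega))]

lemma land_low (e x a : Nat) (hx : x < 2 ^ e) (ha : a < 2 ^ e) :
    x &&& (2 ^ e + a) = x &&& a := by
  apply Nat.eq_of_testBit_eq
  intro i
  rw [Nat.testBit_and, Nat.testBit_and, testBit_pow_add e a i ha]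
  by_cases hie : i = e
  · subst hie
    rw [if_pos rfl, Nat.testBit_eq_false_of_lt hx]
    simp
  · rw [if_neg hie]

lemma land_pred_pow (e a : Nat) (ha : a < 2 ^ e) :
    (2 ^ e - 1) &&& (2 ^ e + a) = a := by
  apply Nat.eq_of_testBit_eq
  intro i
  rw [Nat.testBit_and, testBit_pow_add e a i ha, Nat.testBit_two_pow_sub_one]
  by_cases hie : i = e
  · subst hie
    simp [Nat.testBit_eq_false_of_lt ha]
  · by_cases hlt : i < e
    · simp [hlt, hie]
    · have h1 : a < 2 ^ i := lt_of_lt_of_le ha (Nat.pow_le_pow_right (by omega) (by omega))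
      simp [hlt, hie, Nat.testBit_eq_false_of_lt h1]

lemma land_high (e x a : Nat) (hx : x < 2 ^ e) (ha : a < 2 ^ e) :
    (2 ^ e + x) &&& (2 ^ e + a) = 2 ^ e + (x &&& a) := by
  apply Nat.eq_of_testBit_eq
  intro i
  have hxa : x &&& a < 2 ^ e := lt_of_le_of_lt Nat.and_le_right ha
  rw [testBit_pow_add e (x &&& a) i hxa, Nat.testBit_and, testBit_pow_add e x i hx,
    testBit_pow_add e a i ha]
  by_cases hie : i = e
  · simp [hie]
  · simp [hie, Nat.testBit_and]

-- --- walk characterization ---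

lemma subWalk_low (e a : Nat) (ha : a < 2 ^ e) :
    ∀ sub, sub ≤ a → subWalk (2 ^ e + a) sub = subWalk a sub := by
  intro sub
  induction sub using Nat.strong_induction_on with
  | _ sub ih =>
    intro hs
    by_cases h0 : sub = 0
    · subst h0
      conv_lhs => rw [subWalk]
      conv_rhs => rw [subWalk]
      simp
    · conv_lhs => rw [subWalk]
      conv_rhs => rw [subWalk]
      rw [if_neg h0, if_neg h0, land_low e (sub - 1) a (by omega) ha]
      congr 1
      exact ih ((sub - 1) &&& a)
        (by have := Nat.and_le_left (n := sub - 1) (m := a); omega)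
        Nat.and_le_right

lemma subWalk_high (e a : Nat) (ha : a < 2 ^ e) :
    ∀ s, s &&& a = s →
      subWalk (2 ^ e + a) (2 ^ e + s)
        = ((subWalk a s).map (2 ^ e + ·)) ++ 2 ^ e :: subWalk a a := by
  intro s
  induction s using Nat.strong_induction_on with
  | _ s ih =>
    intro hs
    have hsle : s ≤ a := by rw [← hs]; exact Nat.and_le_right
    have h2e := Nat.two_pow_pos e
    conv_lhs => rw [subWalk]
    rw [if_neg (by omega)]
    by_cases h0 : s = 0
    · subst h0
      have h1 : 2 ^ e + 0 - 1 = 2 ^ e - 1 := by omega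
      rw [h1, land_pred_pow e a ha, subWalk_low e a ha a le_rfl]
      conv_rhs => rw [subWalk]
      simp
    · have h1 : 2 ^ e + s - 1 = 2 ^ e + (s - 1) := by omega
      rw [h1, land_high e (s - 1) a (by omega) ha]
      have hs' : ((s - 1) &&& a) &&& a = (s - 1) &&& a := by rw [Nat.and_assoc, Nat.and_self]
      rw [ih ((s - 1) &&& a)
        (by have := Nat.and_le_left (n := s - 1) (m := a); omega) hs']
      conv_rhs => rw [subWalk, if_neg h0]
      simp

lemma subWalk_subsDesc (E : List Nat) (hd : E.Pairwise (· > ·)) :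
    subWalk (sumE E) (sumE E) ++ [0] = subsDesc E := by
  induction E with
  | nil =>
    rw [subsDesc]
    show subWalk (sumE []) (sumE []) ++ [0] = [0]
    rw [show sumE [] = 0 from rfl, subWalk]
    simp
  | cons e R ih =>
    obtain ⟨h1, h2⟩ := List.pairwise_cons.1 hd
    have ha : sumE R < 2 ^ e := sumE_lt_pow R e h2 h1
    rw [sumE_cons, subWalk_high e (sumE R) ha (sumE R) (Nat.and_self _), subsDesc, ← ih h2]
    simp [List.map_append]

-- --- combinatorics: A's collection is a permutation of all sublists ---

lemma nodup_combinations {α : Type} [DecidableEq α] (x : List α) (r : Nat) (hx : x.Nodup) :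
    (PySem.List.combinations x r).Nodup := by
  induction x generalizing r with
  | nil =>
    cases r with
    | zero => simp [PySem.List.combinations_zero]
    | succ r' => simp [PySem.List.combinations_nil_succ]
  | cons a xs ih =>
    cases r with
    | zero => simp [PySem.List.combinations_zero]
    | succ r' =>
      obtain ⟨ha, hxs⟩ := List.nodup_cons.1 hx
      rw [PySem.List.combinations_cons_succ]
      refine List.Nodup.append ((ih r' hxs).map List.cons_injective) (ih (r' + 1) hxs) ?_
      intro c hc1 hc2
      obtain ⟨c', _, rfl⟩ := List.mem_map.1 hc1
      exact ha ((PySem.List.sublist_of_mem_combinations hc2).subset (by simp))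

lemma full_perm_sublists' {α : Type} [DecidableEq α] (x : List α) (hx : x.Nodup) (hne : x ≠ []) :
    (([[], x] : List (List α)) ++
        (List.range (x.length - 1)).flatMap (fun k => PySem.List.combinations x (k + 1))).Perm
      x.sublists' := by
  have hxlen : 0 < x.length := List.length_pos_iff.2 hne
  have hlen : ∀ k c, c ∈ PySem.List.combinations x (k + 1) → c.length = k + 1 :=
    fun k c hc => ((PySem.List.mem_combinations_iff x (k + 1) c).1 hc).2
  refine (List.perm_ext_iff_of_nodup ?_ (List.nodup_sublists'.2 hx)).2 ?_
  · refine List.Nodup.append (by simp [hne.symm]) ?_ ?_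
    · refine List.nodup_flatMap.2 ⟨fun k _ => nodup_combinations x (k + 1) hx, ?_⟩
      refine List.Pairwise.imp ?_ (List.nodup_range (n := x.length - 1))
      intro k k' hkk' c hc1 hc2
      have := hlen k c hc1
      have := hlen k' c hc2
      omega
    · intro c hc1 hc2
      obtain ⟨k, hk, hck⟩ := List.mem_flatMap.1 hc2
      have hcl := hlen k c hck
      have hk' := List.mem_range.1 hk
      rcases List.mem_pair.1 hc1 with rfl | rfl
      · simp at hcl
      · omega
  · intro c
    constructor
    · intro hc
      rw [List.mem_sublists']
      rcases List.mem_append.1 hc with hc | hc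
      · rcases List.mem_pair.1 hc with rfl | rfl
        · exact List.nil_sublist _
        · exact List.Sublist.refl _
      · obtain ⟨k, _, hck⟩ := List.mem_flatMap.1 hc
        exact PySem.List.sublist_of_mem_combinations hck
    · intro hc
      have hsub := List.mem_sublists'.1 hc
      have hle := hsub.length_le
      rcases Nat.eq_zero_or_pos c.length with h0 | hpos
      · have : c = [] := List.length_eq_zero_iff.1 h0
        subst this
        simp
      · rcases eq_or_lt_of_le hle with heq | hlt
        · have : c = x := hsub.eq_of_length heq
          subst this
          simp
        · refine List.mem_append.2 (Or.inr (List.mem_flatMap.2 ⟨c.length - 1, ?_, ?_⟩))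
          · exact List.mem_range.2 (by omega)
          · exact (PySem.List.mem_combinations_iff x _ c).2 ⟨hsub, by omega⟩

lemma sublist_filter_mem {α : Type} [DecidableEq α] (x j : List α) (hx : x.Nodup)
    (hj : j.Sublist x) : x.filter (fun k => decide (k ∈ j)) = j := by
  induction hj with
  | slnil => simp
  | @cons j l a hj ih =>
    obtain ⟨ha, hl⟩ := List.nodup_cons.1 hx
    rw [List.filter_cons, if_neg (by simp; intro haj; exact ha (hj.subset haj))]
    exact ih hl
  | @cons₂ j l a hj ih =>
    obtain ⟨ha, hl⟩ := List.nodup_cons.1 hx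
    rw [List.filter_cons, if_pos (by simp)]
    congr 1
    rw [List.filter_congr (q := fun k => decide (k ∈ j)) ?_]
    · exact ih hl
    · intro b hb
      simp only [decide_eq_decide, List.mem_cons]
      constructor
      · rintro (rfl | h)
        · exact absurd hb ha
        · exact h
      · exact Or.inr

lemma filter_compl_compl {α : Type} [DecidableEq α] (x j : List α) (hx : x.Nodup) (hj : j.Sublist x) :
    x.filter (fun k => decide (k ∉ x.filter (fun k' => decide (k' ∉ j)))) = j := by
  rw [List.filter_congr (q := fun k => decide (k ∈ j)) ?_]
  · exact sublist_filter_mem x j hx hj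
  · intro b hb
    simp only [decide_eq_decide, List.mem_filter, decide_eq_true_eq]
    constructor
    · intro h
      by_contra hbj
      exact h ⟨hb, hbj⟩
    · intro hbj h
      exact h.2 hbj

lemma compl_perm {α : Type} [DecidableEq α] (x : List α) (hx : x.Nodup) :
    (x.sublists'.map (fun j => x.filter (fun k => decide (k ∉ j)))).Perm x.sublists' := by
  have hsub : ∀ j : List α, (x.filter (fun k => decide (k ∉ j))) ∈ x.sublists' :=
    fun j => List.mem_sublists'.2 List.filter_sublist
  refine (List.perm_ext_iff_of_nodup ?_ (List.nodup_sublists'.2 hx)).2 ?_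
  · refine List.Nodup.map_on ?_ (List.nodup_sublists'.2 hx)
    intro j1 hj1 j2 hj2 heq
    have h1 := filter_compl_compl x j1 hx (List.mem_sublists'.1 hj1)
    have h2 := filter_compl_compl x j2 hx (List.mem_sublists'.1 hj2)
    rw [← h1, ← h2, heq]
  · intro c
    constructor
    · intro hc
      obtain ⟨j, _, rfl⟩ := List.mem_map.1 hc
      exact hsub j
    · intro hc
      refine List.mem_map.2 ⟨x.filter (fun k => decide (k ∉ c)), hsub c, ?_⟩
      exact filter_compl_compl x c hx (List.mem_sublists'.1 hc)

-- --- assembling the A side ---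

lemma enum_ones (n : List Char) : ∀ (s : Int) (init : List Int),
    ((PySem.List.enumerate n s).foldl (fun x ij => if ij.2 = '1' then x ++ [ij.1] else x) init)
      = init ++ (posOnes n).map (fun k : Nat => s + (k : Int)) := by
  induction n with
  | nil => intro s init; simp [PySem.List.enumerate_nil, posOnes]
  | cons c r ih =>
    intro s init
    rw [PySem.List.enumerate_cons, List.foldl_cons]
    by_cases h : c = '1'
    · rw [show posOnes (c :: r) = 0 :: (posOnes r).map (· + 1) from by rw [posOnes, if_pos h]]
      simp only [if_pos h, ih]
      simp only [List.map_cons, List.map_map, List.append_assoc, List.singleton_append,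
        Nat.cast_zero, add_zero]
      congr 2
      apply List.map_congr_left
      intro k _
      simp only [Function.comp_apply]
      push_cast
      ring
    · rw [show posOnes (c :: r) = (posOnes r).map (· + 1) from by rw [posOnes, if_neg h]]
      simp only [if_neg h, ih]
      rw [List.map_map]
      congr 1
      apply List.map_congr_left
      intro k _
      simp only [Function.comp_apply]
      push_cast
      ring

lemma intOfBin_eq (l : List Char) (hl : ∀ c ∈ l, c = '0' ∨ c = '1') :
    intOfBin l = ((parseBinNat l : Nat) : Int) := by
  rw [intOfBin, if_neg ?_]
  cases l with
  | nil => simp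
  | cons c r =>
    simp only [List.head?_cons]
    intro h
    rcases hl c (by simp) with rfl | rfl <;> simp at h

lemma valN_nil (n : List Char) : valN n [] = parseBinNat n := by
  rw [valN, List.foldl_nil]

lemma valN_full (n : List Char) : valN n (posOnes n) = 0 := by
  rw [valN_eq]
  have : (posOnes n).filter (fun k' => decide (k' ∉ posOnes n)) = [] :=
    List.filter_eq_nil_iff.2 (fun k hk => by simp [hk])
  rw [this]
  rfl

-- the pre-sort list of A, as the cast of a Nat-level list
lemma preSort_perm (n : List Char) (hne : posOnes n ≠ []) :
    (([parseBinNat n, 0] : List Nat) ++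
        (List.range ((posOnes n).length - 1)).flatMap (fun k =>
          (PySem.List.combinations (posOnes n) (k + 1)).map (valN n))).Perm
      (subsDesc (exps n)) := by
  set P := posOnes n with hP
  have hPnd : P.Nodup := (posOnes_pairwise n).imp ne_of_lt
  have h1 : ([parseBinNat n, 0] : List Nat) ++
        (List.range (P.length - 1)).flatMap (fun k =>
          (PySem.List.combinations P (k + 1)).map (valN n))
      = (([[], P] : List (List Nat)) ++
          (List.range (P.length - 1)).flatMap (fun k =>
            PySem.List.combinations P (k + 1))).map (valN n) := by
    rw [List.map_append, List.map_flatMap]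
    simp [valN_nil, valN_full, hP]
  rw [h1]
  refine ((full_perm_sublists' P hPnd hne).map (valN n)).trans ?_
  have h2 : P.sublists'.map (valN n)
      = (P.sublists'.map (fun j => P.filter (fun k => decide (k ∉ j)))).map
          (fun L => sumE (L.map (fun k => n.length - 1 - k))) := by
    rw [List.map_map]
    apply List.map_congr_left
    intro j _
    simp only [Function.comp_apply]
    rw [valN_eq, hP]
  rw [h2]
  refine ((compl_perm P hPnd).map _).trans ?_
  have h3 : P.sublists'.map (fun L => sumE (L.map (fun k => n.length - 1 - k)))
      = ((exps n).sublists').map sumE := by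
    rw [exps_eq_map, ← hP, List.sublists'_map, List.map_map]
    rfl
  rw [h3]
  exact (subsDesc_perm (exps n)).symm

lemma main_pos (t : Int) (ht : 0 < t) : iterMask t = iterMask_alt t := by
  have hta : ((t.toNat : Nat) : Int) = t := Int.toNat_of_nonneg ht.le
  set a := t.toNat with hadef
  have ha0 : a ≠ 0 := by omega
  set n := binDigits a with hndef
  have hchars := binDigits_chars a
  have hparse : parseBinNat n = a := parse_binDigits a
  set P := posOnes n with hPdef
  have hPne : P ≠ [] := by
    intro h
    apply ha0
    rw [← hparse, parse_eq_sumE, exps_eq_map, ← hPdef, h, List.map_nil]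
    rfl
  have hS : sumE (exps n) = a := by rw [← parse_eq_sumE, hparse]
  -- evaluate the B side
  have hB : iterMask_alt t = (subsDesc (exps n)).map (fun s : Nat => (s : Int)) := by
    rw [iterMask_alt, ← hadef, ← subWalk_subsDesc (exps n) (exps_pairwise n), hS]
    simp
  -- evaluate the A side
  have htb : toBin t = n := by rw [toBin, if_neg (by omega), ← hadef, hndef]
  rw [iterMask]
  simp only [htb, enum_ones n 0 [], List.nil_append, zero_add]
  -- the collected ones positions, as Ints
  have hx : (P.map (fun k : Nat => (k : Int))).length = P.length := List.length_map _
  simp only [← hPdef, PySem.List.foldl_append_singleton_eq_map, PySem.List.foldl_append_eq_flatMap,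
    PySem.List.len_eq, hx]
  -- turn the Int-level flatMap into the cast of the Nat-level one
  have hrange : PySem.List.pyRange 1 (P.length : Int) 1
      = (List.range (P.length - 1)).map (fun k : Nat => ((k : Int) + 1)) := by
    rw [PySem.List.pyRange_one]
    have hN : (((P.length : Int)) - 1).toNat = P.length - 1 := by omega
    rw [hN]
    apply List.map_congr_left
    intro k _
    ring
  rw [hrange, List.flatMap_map]
  have hbody : ∀ k : Nat,
      (PySem.List.combinations (P.map (fun k : Nat => (k : Int))) ((k : Int) + 1).toNat).map
          (fun j => intOfBin (j.foldl (fun y k => PySem.List.pySetD y k '0') n))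
        = ((PySem.List.combinations P (k + 1)).map (valN n)).map (fun s : Nat => (s : Int)) := by
    intro k
    have htn : ((k : Int) + 1).toNat = k + 1 := by omega
    rw [htn, PySem.List.combinations_map, List.map_map, List.map_map]
    apply List.map_congr_left
    intro j hj
    simp only [Function.comp_apply, List.foldl_map, PySem.List.pySetD_natCast]
    rw [intOfBin_eq _ (chars_setFold n hchars j), valN]
  have hflat : (List.range (P.length - 1)).flatMap (fun k : Nat =>
        (PySem.List.combinations (P.map (fun k : Nat => (k : Int))) ((k : Int) + 1).toNat).map
          (fun j => intOfBin (j.foldl (fun y k => PySem.List.pySetD y k '0') n)))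
      = ((List.range (P.length - 1)).flatMap (fun k =>
          (PySem.List.combinations P (k + 1)).map (valN n))).map (fun s : Nat => (s : Int)) := by
    rw [List.map_flatMap]
    exact List.flatMap_congr (fun k _ => hbody k)
  rw [hflat]
  -- now everything is the cast of the Nat-level pre-sort list
  have hcast : ([t, 0] : List Int) ++ ((List.range (P.length - 1)).flatMap (fun k =>
        (PySem.List.combinations P (k + 1)).map (valN n))).map (fun s : Nat => (s : Int))
      = ((([parseBinNat n, 0] : List Nat) ++
          (List.range (P.length - 1)).flatMap (fun k =>
            (PySem.List.combinations P (k + 1)).map (valN n))).map (fun s : Nat => (s : Int))) := by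
    rw [List.map_append, hparse]
    simp [← hta]
  rw [hcast]
  -- sort a strictly descending permutation
  have hperm := (preSort_perm n hPne).map (fun s : Nat => (s : Int))
  have hpw : ((subsDesc (exps n)).map (fun s : Nat => (s : Int))).Pairwise
      (fun A B : Int => B < A) :=
    (subsDesc_pairwise (exps n) (exps_pairwise n)).map _
      (fun a b h => by exact_mod_cast h)
  rw [hB]
  exact PySem.List.sorted_rev_eq_of_perm_of_pairwise_gt _ _ _ hperm.symm hpw

-- --- the t = 0 witness values ---

lemma iterMask_zero : iterMask 0 = [0, 0] := by
  have hb : toBin (0 : Int) = ['0'] := by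
    rw [toBin, if_neg (by norm_num), binDigits]
    norm_num
  simp only [iterMask, hb]
  decide

lemma iterMask_alt_zero : iterMask_alt 0 = [0] := by
  rw [iterMask_alt]
  have h : subWalk (Int.toNat 0) (Int.toNat 0) = [] := by
    rw [subWalk]
    simp
  rw [h]
  simp

-- ===== VERDICT (by name: the statements are the Claim_ definitions above) =====
theorem iterMask_spec : Claim_unchanged_iterMask := by
  intro t _ hpre hD
  exact main_pos t (by unfold Pre_iterMask at hpre; unfold D_iterMask at hD; omega)

theorem iterMask_changed : Claim_changed_iterMask := by
  unfold Claim_changed_iterMask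
  refine ⟨by decide, by decide, by decide, ?_, ?_, by decide⟩
  · exact iterMask_zero
  · exact iterMask_alt_zero

theorem iterMask_tight : Claim_exact_iterMask := by
  intro t _ _ hD
  unfold D_iterMask at hD
  subst hD
  rw [iterMask_zero, iterMask_alt_zero]
  decide
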